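-- pv_equiv track=rewrite | github.com/weedmo/programmers_backjun_solution | 프로그래머스/0/181932. 코드 처리하기/코드 처리하기.py | solution
-- ===== SOURCE A (Python) =====
-- def solution(code):
--     answer = ''
--     mode = 0
--     for i in range(len(code)):
--         if code[i] == '1':
--             mode = (mode + 1) % 2
--         else:
--             if mode == 0 and i % 2 == 0:
--                 answer += code[i]
--             elif mode == 1 and i % 2 == 1:
--                 answer += code[i]
--
--     return answer if answer else "EMPTY"
-- ===== SOURCE B (Python) =====
-- def solution(code):
--     # prefix table: prefix[i] = number of '1' characters in code[:i]
--     prefix = []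
--     ones = 0
--     for ch in code:
--         prefix.append(ones)
--         if ch == '1':
--             ones += 1
--     answer = ''.join(code[i] for i in range(len(code))
--                      if code[i] != '1' and prefix[i] % 2 == i % 2)
--     return answer or 'EMPTY'
-- ===== Notes on version B (the rewrite author's own statement) =====
-- stated objective: alternative
-- what changed: Replaced A's single stateful mode-toggling loop by a two-pass decomposition: build a prefix table of cumulative '1'-counts, then select characters with a parity-comparison filter and join them.
import Mathlib
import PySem

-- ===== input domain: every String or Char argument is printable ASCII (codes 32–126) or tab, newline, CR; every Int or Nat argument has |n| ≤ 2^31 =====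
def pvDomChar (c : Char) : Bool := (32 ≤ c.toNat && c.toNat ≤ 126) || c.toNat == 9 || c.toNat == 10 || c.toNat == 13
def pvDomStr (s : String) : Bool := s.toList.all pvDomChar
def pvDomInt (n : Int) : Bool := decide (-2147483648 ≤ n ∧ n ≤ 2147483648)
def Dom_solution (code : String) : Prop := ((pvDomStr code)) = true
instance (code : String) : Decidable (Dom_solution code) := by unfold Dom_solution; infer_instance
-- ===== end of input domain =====

-- B replaces A's stateful mode-toggle loop by a prefix table of '1'-counts plus a
-- single parity filter (objective: alternative decomposition, same cost).

-- ===== PORT A =====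
-- loop body of A: state = (answer, mode), input = (index, character)
def solutionStep (st : List Char × Int) (p : Int × Char) : List Char × Int :=
  if p.2 = '1' then (st.1, (st.2 + 1) % 2)
  else if st.2 = 0 ∧ p.1 % 2 = 0 then (st.1 ++ [p.2], st.2)
  else if st.2 = 1 ∧ p.1 % 2 = 1 then (st.1 ++ [p.2], st.2)
  else st

def solution (code : String) : String :=
  let st := (PySem.List.enumerate code.toList 0).foldl solutionStep ([], 0)
  if st.1 = [] then "EMPTY" else String.ofList st.1

-- ===== PORT B =====
-- prefix table: entry for position i is the number of '1' characters before i
def prefixOnes (ones : Int) : List Char → List Int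
  | [] => []
  | c :: t => ones :: prefixOnes (if c = '1' then ones + 1 else ones) t

def solution_alt (code : String) : String :=
  let l := code.toList
  let pre := prefixOnes 0 l
  let picked := ((PySem.List.enumerate l 0).zip pre).filterMap
    (fun p => if p.1.2 ≠ '1' ∧ p.2 % 2 = p.1.1 % 2 then some p.1.2 else none)
  if picked = [] then "EMPTY" else String.ofList picked

-- ===== PRECONDITION & SPEC =====
def Spec_solution (code : String) (out : String) : Prop := out = solution_alt code
instance (code : String) (out : String) : Decidable (Spec_solution code out) := by unfold Spec_solution; infer_instance

-- ===== CLAIM (what is proved, stated in full; the proofs are below) =====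
def Claim_equal_solution : Prop := ∀ (code : String), Dom_solution code → Spec_solution code (solution code)

-- ===== LEMMAS AND PROOFS =====

theorem solution_key (l : List Char) : ∀ (i ones : Int) (acc : List Char),
    0 ≤ i → 0 ≤ ones →
    ((PySem.List.enumerate l i).foldl solutionStep (acc, ones % 2)).1
      = acc ++ ((PySem.List.enumerate l i).zip (prefixOnes ones l)).filterMap
          (fun p => if p.1.2 ≠ '1' ∧ p.2 % 2 = p.1.1 % 2 then some p.1.2 else none) := by
  induction l with
  | nil => intro i ones acc _ _; simp [PySem.List.enumerate]
  | cons c t ih =>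
    intro i ones acc hi hones
    rw [PySem.List.enumerate_cons]
    simp only [prefixOnes, List.zip_cons_cons, List.foldl_cons, List.filterMap_cons]
    by_cases hc : c = '1'
    · subst hc
      have hmode : (ones % 2 + 1) % 2 = (ones + 1) % 2 := by omega
      simp only [solutionStep, hmode, if_pos, ne_eq, not_true_eq_false,
        false_and, ite_false]
      have := ih (i + 1) (ones + 1) acc (by omega) (by omega)
      simpa using this
    · simp only [ne_eq, hc, not_false_eq_true, true_and]
      by_cases hp : ones % 2 = i % 2
      · have hjoin : solutionStep (acc, ones % 2) (i, c) = (acc ++ [c], ones % 2) := by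
          have h0 : (ones % 2 = 0 ∧ i % 2 = 0) ∨ (ones % 2 = 1 ∧ i % 2 = 1) := by omega
          rcases h0 with ⟨h1, h2⟩ | ⟨h1, h2⟩ <;> simp [solutionStep, hc, h1, h2]
        rw [hjoin, if_pos hp]
        have := ih (i + 1) ones (acc ++ [c]) (by omega) hones
        simpa using this
      · have hskip : solutionStep (acc, ones % 2) (i, c) = (acc, ones % 2) := by
          simp only [solutionStep, if_neg hc]
          split_ifs with ha hb
          · exact absurd (by omega : ones % 2 = i % 2) hp
          · exact absurd (by omega : ones % 2 = i % 2) hp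
          · rfl
        rw [hskip, if_neg hp]
        exact ih (i + 1) ones acc (by omega) hones

-- ===== VERDICT (by name: the statement is the Claim_ definition above) =====
theorem solution_spec : Claim_equal_solution := by
  intro code _
  have h := solution_key code.toList 0 0 [] le_rfl le_rfl
  simp only [show (0 : Int) % 2 = 0 from rfl, List.nil_append] at h
  simp only [Spec_solution, solution, solution_alt]
  rw [h]
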